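-- pv_equiv track=rewrite | github.com/OneSkyMario/E-BTS-V2 | Oscilliscope_Readings_EBTS/oscill_analysis_flickering.py | find_data_region
-- ===== SOURCE A (Python) =====
-- def try_float(x):
--     try:
--         return float(str(x).strip())
--     except Exception:
--         return None
--
-- def find_data_region(rows):
--     header_idx = None
--     numeric_start_idx = None
--
--     for i, row in enumerate(rows):
--         cells = [str(c).strip() for c in row if str(c).strip() != ""]
--         if not cells:
--             continue
--
--         lower = [c.lower() for c in cells]
--         if any("time" in c for c in lower) and len(cells) >= 2:
--             header_idx = i
--             break
--
--     if header_idx is not None: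
--         return header_idx, True
--
--     for i, row in enumerate(rows):
--         vals = [try_float(c) for c in row]
--         numeric_count = sum(v is not None for v in vals)
--         if numeric_count >= 2:
--             numeric_start_idx = i
--             break
--
--     if numeric_start_idx is None:
--         raise ValueError("Could not find numeric waveform data in file.")
--
--     return numeric_start_idx, False
-- ===== SOURCE B (Python) =====
-- def _is_numeric(c):
--     try:
--         float(str(c).strip())
--         return True
--     except Exception:
--         return False
--
-- def find_data_region(rows):
--     first_numeric = None
--     for i, row in enumerate(rows):
--         cells = [str(c).strip() for c in row if str(c).strip() != ""]
--         if len(cells) >= 2 and any("time" in c.lower() for c in cells):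
--             return i, True
--         if first_numeric is None and sum(_is_numeric(c) for c in row) >= 2:
--             first_numeric = i
--     if first_numeric is None:
--         raise ValueError("Could not find numeric waveform data in file.")
--     return first_numeric, False
-- ===== Notes on version B (the rewrite author's own statement) =====
-- stated objective: simpler
-- what changed: A's two sequential full scans (header pass, then a separate numeric pass from the top) are fused into one loop that returns at the first header row and remembers the first numeric row as a fallback.
import Mathlib
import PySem

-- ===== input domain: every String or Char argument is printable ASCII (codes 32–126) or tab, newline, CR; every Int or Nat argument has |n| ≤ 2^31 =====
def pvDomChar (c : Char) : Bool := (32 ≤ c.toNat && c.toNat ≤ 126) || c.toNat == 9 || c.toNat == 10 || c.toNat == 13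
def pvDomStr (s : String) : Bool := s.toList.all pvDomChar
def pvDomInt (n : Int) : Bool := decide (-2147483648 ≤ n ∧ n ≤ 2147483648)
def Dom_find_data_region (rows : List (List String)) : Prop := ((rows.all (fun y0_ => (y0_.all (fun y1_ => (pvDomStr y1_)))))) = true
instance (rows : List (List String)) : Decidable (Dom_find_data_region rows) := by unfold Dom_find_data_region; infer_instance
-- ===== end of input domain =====

-- B replaces A's two sequential scans (header pass, then numeric pass) by ONE loop that
-- returns at the first header row and remembers the first numeric row as a fallback
-- (objective: simpler / single pass). On inputs where Python A raises ValueError both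
-- Pythons raise the same error (excluded by Pre_); the ports return (-1, false) there.

-- ---- shared hand port of float(s) VALIDITY (PySem has no float; only `is not None`
-- ---- matters to either Python). Exact for pre-stripped printable-ASCII strings:
-- ---- sign? (inf|infinity|nan (case-insens.) | digits[.digits?] | .digits) [eE sign? digits],
-- ---- with single '_' only between digits — checked against CPython float() by fuzzing.
-- a digit run with single underscores strictly between digits
def pvDigitPart (cs : List Char) : Bool :=
  !cs.isEmpty && cs.all (fun c => c.isDigit || c == '_')
    && (cs.head?.getD ' ').isDigit && (cs.getLast?.getD ' ').isDigit
    && (cs.zip cs.tail).all (fun p => !(p.1 == '_' && p.2 == '_'))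

-- the mantissa: digits | digits '.' digits? | '.' digits
def pvMantOk (m : List Char) : Bool :=
  match List.splitOn '.' m with
  | [d] => pvDigitPart d
  | [a, b] => (pvDigitPart a || a.isEmpty) && (pvDigitPart b || b.isEmpty) && (!a.isEmpty || !b.isEmpty)
  | _ => false

-- the exponent after 'e': optional sign, then digits
def pvExpOk (e : List Char) : Bool :=
  match e with
  | [] => false
  | c :: u => if c = '+' ∨ c = '-' then pvDigitPart u else pvDigitPart (c :: u)

def pvFloatBody (cs : List Char) : Bool :=
  let low := PySem.Chars.lower cs
  if low = "inf".toList ∨ low = "infinity".toList ∨ low = "nan".toList then true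
  else
    match List.splitOn 'e' low with
    | [m] => pvMantOk m
    | [m, e] => pvMantOk m && pvExpOk e
    | _ => false

-- float(s) succeeds (s already stripped)
def pyFloatOk (s : String) : Bool :=
  match s.toList with
  | [] => false
  | c :: rest => if c = '+' ∨ c = '-' then pvFloatBody rest else pvFloatBody (c :: rest)

-- [str(c).strip() for c in row if str(c).strip() != ""]  (same comprehension in Source A and Source B)
def pvCells (row : List String) : List String :=
  row.filterMap (fun c => let s := PySem.Str.strip c; if s = "" then none else some s)

-- ===== PORT A =====
-- try_float(c): some () iff float(str(c).strip()) succeeds (the float value itself is never used by A)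
def pvTryFloat (c : String) : Option Unit :=
  if pyFloatOk (PySem.Str.strip c) then some () else none

-- A's first loop: first i whose row has nonempty cells, some lowered cell containing "time", and ≥ 2 cells
def pvHeaderLoop : List (List String) → Int → Option Int
  | [], _ => none
  | row :: rest, i =>
      let cells := pvCells row
      if cells = [] then pvHeaderLoop rest (i + 1)
      else if ((cells.map PySem.Str.lower).any (fun c => PySem.Str.isIn "time" c)) && decide (2 ≤ cells.length) then some i
      else pvHeaderLoop rest (i + 1)

-- A's second loop: first i with ≥ 2 float-parseable cells
def pvNumLoop : List (List String) → Int → Option Int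
  | [], _ => none
  | row :: rest, i =>
      let vals := row.map pvTryFloat
      if 2 ≤ vals.countP (fun v => v.isSome) then some i
      else pvNumLoop rest (i + 1)

def find_data_region (rows : List (List String)) : Int × Bool :=
  match pvHeaderLoop rows 0 with
  | some h => (h, true)
  | none =>
    match pvNumLoop rows 0 with
    | some n => (n, false)
    | none => (-1, false)   -- Python raises ValueError here; excluded by Pre_

-- ===== PORT B =====
-- Source B's _is_numeric(c)
def pvIsNumericB (c : String) : Bool := pyFloatOk (PySem.Str.strip c)

-- Source B's single loop: return at the first header row, remember the first numeric row
def pvLoopB : List (List String) → Int → Option Int → Int × Bool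
  | [], _, fn =>
      match fn with
      | some n => (n, false)
      | none => (-1, false)   -- Python raises ValueError here; excluded by Pre_
  | row :: rest, i, fn =>
      let cells := pvCells row
      if decide (2 ≤ cells.length) && cells.any (fun c => PySem.Str.isIn "time" (PySem.Str.lower c)) then (i, true)
      else
        let fn' := if fn.isNone && decide (2 ≤ row.countP pvIsNumericB) then some i else fn
        pvLoopB rest (i + 1) fn'

def find_data_region_alt (rows : List (List String)) : Int × Bool :=
  pvLoopB rows 0 none

-- ===== PRECONDITION & SPEC =====
def pvHeaderRowB (row : List String) : Bool :=
  decide (2 ≤ (pvCells row).length) && (pvCells row).any (fun c => PySem.Str.isIn "time" (PySem.Str.lower c))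

-- Pre_ excludes exactly the inputs on which Python A raises ValueError ("Could not find
-- numeric waveform data in file."): no header row and no row with ≥ 2 float-parseable cells.
-- (Python B raises the identical ValueError there.)
def Pre_find_data_region (rows : List (List String)) : Prop :=
  (rows.any pvHeaderRowB || rows.any (fun row => decide (2 ≤ row.countP pvIsNumericB))) = true
instance (rows : List (List String)) : Decidable (Pre_find_data_region rows) := by
  unfold Pre_find_data_region; infer_instance

def pvWitness_find_data_region : List (List String) := [["Time (s)", "CH1"], ["0.0", "1.5"]]

def Spec_find_data_region (rows : List (List String)) (out : Int × Bool) : Prop := out = find_data_region_alt rows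
instance (rows : List (List String)) (out : Int × Bool) : Decidable (Spec_find_data_region rows out) := by unfold Spec_find_data_region; infer_instance

-- ===== CLAIM (what is proved, stated in full; the proofs are below) =====
def Claim_equal_find_data_region : Prop := ∀ (rows : List (List String)), Dom_find_data_region rows → Pre_find_data_region rows → Spec_find_data_region rows (find_data_region rows)

-- ===== LEMMAS AND PROOFS =====

-- A's header test for a row equals B's (map-then-any vs any-of-composite, && commuted);
-- it is false on a row with empty cells, so A's `continue` branch is absorbed.
theorem pv_header_cond_eq (cells : List String) :
    (((cells.map PySem.Str.lower).any (fun c => PySem.Str.isIn "time" c)) && decide (2 ≤ cells.length))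
      = (decide (2 ≤ cells.length) && cells.any (fun c => PySem.Str.isIn "time" (PySem.Str.lower c))) := by
  rw [Bool.and_comm, List.any_map]
  rfl

-- A's numeric test for a row equals B's count
theorem pv_num_cond_eq (row : List String) :
    (row.map pvTryFloat).countP (fun v => v.isSome) = row.countP pvIsNumericB := by
  rw [List.countP_map]
  apply List.countP_congr
  intro c _
  simp [pvTryFloat, pvIsNumericB, Function.comp]

-- loop invariant: B's single loop computes A's header-scan result, falling back to the
-- remembered first numeric index, and otherwise to A's numeric scan of the same suffix
theorem pvLoopB_eq (rows : List (List String)) : ∀ (i : Int) (fn : Option Int),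
    pvLoopB rows i fn =
      match pvHeaderLoop rows i with
      | some h => (h, true)
      | none =>
        match fn with
        | some n => (n, false)
        | none =>
          match pvNumLoop rows i with
          | some n => (n, false)
          | none => (-1, false) := by
  induction rows with
  | nil => intro i fn; cases fn <;> rfl
  | cons row rest ih =>
    intro i fn
    by_cases hhd : (decide (2 ≤ (pvCells row).length) && (pvCells row).any (fun c => PySem.Str.isIn "time" (PySem.Str.lower c))) = true
    · -- header row: both return (i, true)
      have hne : pvCells row ≠ [] := by
        intro h0
        rw [h0] at hhd
        simp at hhd
      have hA : pvHeaderLoop (row :: rest) i = some i := by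
        simp only [pvHeaderLoop, if_neg hne, pv_header_cond_eq, hhd, if_pos]
      simp only [pvLoopB, hhd, if_pos, hA]
    · -- not a header row: A's loop skips it too
      have hA : pvHeaderLoop (row :: rest) i = pvHeaderLoop rest (i + 1) := by
        by_cases hne : pvCells row = []
        · simp only [pvHeaderLoop, if_pos hne]
        · simp only [pvHeaderLoop, if_neg hne, pv_header_cond_eq, hhd, if_neg, Bool.false_eq_true,
            not_false_eq_true]
      simp only [pvLoopB, hhd, if_neg, Bool.false_eq_true, not_false_eq_true, ih, hA]
      cases hH : pvHeaderLoop rest (i + 1) with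
      | some h => rfl
      | none =>
        cases fn with
        | some n => rfl
        | none =>
          simp only [Option.isNone_none, Bool.true_and]
          by_cases hnum : (2 ≤ row.countP pvIsNumericB)
          · have hNL : pvNumLoop (row :: rest) i = some i := by
              simp only [pvNumLoop, pv_num_cond_eq]
              rw [if_pos hnum]
            simp only [hnum, decide_true, if_pos, hNL]
          · have hNL : pvNumLoop (row :: rest) i = pvNumLoop rest (i + 1) := by
              simp only [pvNumLoop, pv_num_cond_eq]
              rw [if_neg hnum]
            simp only [hnum, decide_false, if_neg, Bool.false_eq_true, not_false_eq_true, hNL]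

-- ===== VERDICT (by name: the statement is the Claim_ definition above) =====
theorem find_data_region_spec : Claim_equal_find_data_region := by
  intro rows _ _
  unfold Spec_find_data_region find_data_region find_data_region_alt
  rw [pvLoopB_eq rows 0 none]
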